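-- pv_equiv track=rewrite | github.com/Nelfe80/RetroBat-Marquee-Manager | MAMEListenerWS.py | find_repeating_block
-- ===== SOURCE A (Python) =====
-- def find_repeating_block(messages):
--     """
--     Pour une liste de messages, détermine le bloc minimal qui se répète.
--     Par exemple, si messages == [A, B, C, A, B, C], retourne [A, B, C].
--     Si aucun bloc répétitif n'est détecté, retourne messages.
--     """
--     n = len(messages)
--     if n <= 1:
--         return messages
--     for p in range(1, n + 1):
--         if n % p == 0:
--             block = messages[:p]
--             if block * (n // p) == messages:
--                 return block
--     return messages
-- ===== SOURCE B (Python) =====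
-- def find_repeating_block(messages):
--     """Find the smallest period q by self-overlap scan, then return the
--     block messages[:q] only when q divides len(messages)."""
--     n = len(messages)
--     q = 1
--     while q < n and any(messages[i] != messages[i - q] for i in range(q, n)):
--         q += 1
--     if q < n and n % q == 0:
--         return messages[:q]
--     return messages
-- ===== Notes on version B (the rewrite author's own statement) =====
-- stated objective: alternative
-- what changed: B finds the smallest self-overlap period q with a single early-exit scan (any(messages[i] != messages[i-q])) and then performs one divisibility test n % q == 0, instead of A's trial of every divisor p of n with a freshly built block * (n // p) list compared against messages; the equivalence rests on the Fine-Wilf periodicity argument.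
import Mathlib
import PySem

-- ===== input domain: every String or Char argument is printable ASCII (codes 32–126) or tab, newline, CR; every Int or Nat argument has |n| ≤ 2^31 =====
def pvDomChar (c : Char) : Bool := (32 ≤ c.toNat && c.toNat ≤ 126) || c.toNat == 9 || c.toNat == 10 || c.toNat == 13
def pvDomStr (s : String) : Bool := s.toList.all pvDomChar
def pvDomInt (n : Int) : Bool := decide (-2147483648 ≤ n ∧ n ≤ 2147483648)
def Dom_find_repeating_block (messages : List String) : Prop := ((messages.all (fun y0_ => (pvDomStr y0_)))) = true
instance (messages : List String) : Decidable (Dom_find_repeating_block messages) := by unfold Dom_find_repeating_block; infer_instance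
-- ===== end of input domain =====

-- B finds the smallest self-overlap period q by one scan and then performs a single
-- divisibility test, instead of A's trial of every divisor p with a rebuilt block*(n//p).
-- Objective: alternative (different algorithm, similar cost).

-- ===== PORT A =====
-- for p in range(1, n+1): if n % p == 0: block = messages[:p]; if block*(n//p) == messages: return block
def pvA_loop (messages : List String) (n : Int) : List Int → List String
  | [] => messages
  | p :: ps =>
    if PySem.Int.mod n p = 0 then
      let block := PySem.List.slice messages none (some p)
      if PySem.List.pyRepeat block (PySem.Int.floordiv n p) = messages then block
      else pvA_loop messages n ps
    else pvA_loop messages n ps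

def find_repeating_block (messages : List String) : List String :=
  let n : Int := (messages.length : Int)
  if n ≤ 1 then messages
  else pvA_loop messages n (PySem.List.pyRange 1 (n + 1) 1)

-- ===== PORT B =====
-- any(messages[i] != messages[i - q] for i in range(q, n))
def pvB_check (messages : List String) (n q : Int) : Bool :=
  (PySem.List.pyRange q n 1).any (fun i =>
    !(PySem.List.pyGetD messages i "" == PySem.List.pyGetD messages (i - q) ""))

-- while q < n and any(...): q += 1
def pvB_loop (messages : List String) (n q : Int) : Int :=
  if h : q < n ∧ pvB_check messages n q = true then
    pvB_loop messages n (q + 1)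
  else q
termination_by (n - q).toNat
decreasing_by omega

def find_repeating_block_alt (messages : List String) : List String :=
  let n : Int := (messages.length : Int)
  let q := pvB_loop messages n 1
  if q < n ∧ PySem.Int.mod n q = 0 then PySem.List.slice messages none (some q)
  else messages

-- ===== PRECONDITION & SPEC =====
def Spec_find_repeating_block (messages : List String) (out : List String) : Prop := out = find_repeating_block_alt messages
instance (messages : List String) (out : List String) : Decidable (Spec_find_repeating_block messages out) := by unfold Spec_find_repeating_block; infer_instance

-- ===== CLAIM (what is proved, stated in full; the proofs are below) =====
def Claim_equal_find_repeating_block : Prop := ∀ (messages : List String), Dom_find_repeating_block messages → Spec_find_repeating_block messages (find_repeating_block messages)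

-- ===== LEMMAS AND PROOFS =====

-- s has period q (pointwise, with default-valued access)
def pvPer (s : List String) (q : Nat) : Prop :=
  ∀ i : Nat, i < s.length → q ≤ i → s.getD i "" = s.getD (i - q) ""

lemma pvPer_length (s : List String) : pvPer s s.length := by
  intro i hi hq; omega

-- elements of a q-periodic list are determined by index mod q
lemma pvPer_mod (s : List String) (q : Nat) (hq : 0 < q) (h : pvPer s q) :
    ∀ i : Nat, i < s.length → s.getD i "" = s.getD (i % q) "" := by
  intro i
  induction i using Nat.strong_induction_on with
  | _ i ih =>
    intro hi
    by_cases hlt : i < q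
    · rw [Nat.mod_eq_of_lt hlt]
    · rw [Nat.not_lt] at hlt
      have h1 := h i hi hlt
      have h2 := ih (i - q) (by omega) (by omega)
      rw [Nat.mod_eq_sub_mod hlt]
      rw [h1, h2]

lemma pvLen_flatten_replicate {α : Type} (k : Nat) (b : List α) :
    (List.replicate k b).flatten.length = k * b.length := by
  induction k with
  | zero => simp
  | succ k ih => simp [List.replicate_succ, ih]; ring

lemma pvGetD_flatten_replicate {α : Type} (d : α) :
    ∀ (k : Nat) (b : List α) (i : Nat), i < k * b.length →
      ((List.replicate k b).flatten.getD i d) = b.getD (i % b.length) d := by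
  intro k
  induction k with
  | zero => intro b i hi; omega
  | succ k ih =>
    intro b i hi
    rw [List.replicate_succ, List.flatten_cons]
    by_cases hlt : i < b.length
    · rw [List.getD_append _ _ _ _ hlt, Nat.mod_eq_of_lt hlt]
    · rw [Nat.not_lt] at hlt
      rw [List.getD_append_right _ _ _ _ hlt]
      have hmul : (k + 1) * b.length = k * b.length + b.length := by ring
      rw [ih b (i - b.length) (by omega)]
      rw [Nat.mod_eq_sub_mod hlt]

-- A's test "block * (n//p) == messages" is exactly p-periodicity, for p ∣ n, 0 < p ≤ n
lemma pvBridgeA (s : List String) (p : Nat) (hp : 0 < p) (hpn : p ≤ s.length)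
    (hd : p ∣ s.length) :
    ((List.replicate (s.length / p) (s.take p)).flatten = s) ↔ pvPer s p := by
  have hb : (s.take p).length = p := by simp; omega
  have hkp : s.length / p * p = s.length := Nat.div_mul_cancel hd
  have hget : ∀ i : Nat, i < s.length →
      (List.replicate (s.length / p) (s.take p)).flatten.getD i "" = s.getD (i % p) "" := by
    intro i hi
    rw [pvGetD_flatten_replicate "" (s.length / p) (s.take p) i (by rw [hb]; omega)]
    rw [hb]
    have hip : i % p < p := Nat.mod_lt _ hp
    rw [List.getD_eq_getElem _ _ (by omega), List.getD_eq_getElem _ _ (by omega)]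
    exact List.getElem_take
  constructor
  · intro h i hi hpi
    have e1 : s.getD i "" = s.getD (i % p) "" := by
      conv_lhs => rw [← h]
      exact hget i hi
    have e2 : s.getD (i - p) "" = s.getD ((i - p) % p) "" := by
      conv_lhs => rw [← h]
      exact hget (i - p) (by omega)
    rw [e1, e2, Nat.mod_eq_sub_mod hpi]
  · intro h
    have hlen : (List.replicate (s.length / p) (s.take p)).flatten.length = s.length := by
      rw [pvLen_flatten_replicate, hb, hkp]
    apply List.ext_getElem hlen
    intro i hi1 hi2
    rw [← List.getD_eq_getElem _ "" hi1, ← List.getD_eq_getElem _ "" hi2]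
    rw [hget i (by omega), ← pvPer_mod s p hp h i (by omega)]

-- B's test "any(messages[i] != messages[i-q])" is false exactly on q-periodicity
lemma pvBridgeB (s : List String) (q : Nat) :
    pvB_check s (s.length : Int) (q : Int) = false ↔ pvPer s q := by
  rw [pvB_check, List.any_eq_false]
  constructor
  · intro h i hi hqi
    have hmem : (i : Int) ∈ PySem.List.pyRange (q : Int) (s.length : Int) 1 := by
      rw [PySem.List.mem_pyRange_one]; omega
    have hsub : (i : Int) - (q : Int) = ((i - q : Nat) : Int) := by omega
    have := h (i : Int) hmem
    rw [hsub, PySem.List.pyGetD_natCast, PySem.List.pyGetD_natCast] at this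
    simpa using this
  · intro h x hmem
    rw [PySem.List.mem_pyRange_one] at hmem
    lift x to Nat using (by omega : 0 ≤ x) with j
    have hsub : (j : Int) - (q : Int) = ((j - q : Nat) : Int) := by omega
    rw [hsub, PySem.List.pyGetD_natCast, PySem.List.pyGetD_natCast]
    simpa using h j (by omega) (by omega)

-- Fine–Wilf subtraction step
lemma pvPer_sub (s : List String) (p q : Nat) (_hp : 0 < p) (hpq : p < q)
    (hn : p + q ≤ s.length) (h1 : pvPer s p) (h2 : pvPer s q) : pvPer s (q - p) := by
  intro i hi hqp
  by_cases hc : q ≤ i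
  · have e1 : i - (q - p) = (i - q) + p := by omega
    have h2i := h2 i hi hc
    have h1j := h1 ((i - q) + p) (by omega) (by omega)
    have e2 : (i - q) + p - p = i - q := by omega
    rw [e2] at h1j
    rw [e1, h2i, h1j]
  · rw [Nat.not_le] at hc
    have e1 : i - (q - p) = (i + p) - q := by omega
    have ht : i + p < s.length := by omega
    have h1t := h1 (i + p) ht (by omega)
    have e2 : i + p - p = i := by omega
    rw [e2] at h1t
    have h2t := h2 (i + p) ht (by omega)
    rw [e1, ← h1t, h2t]

-- weak Fine–Wilf: two periods whose sum fits give the gcd period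
lemma pvPer_gcd (s : List String) :
    ∀ m p q : Nat, p + q ≤ m → 0 < p → 0 < q → p + q ≤ s.length →
      pvPer s p → pvPer s q → pvPer s (Nat.gcd p q) := by
  intro m
  induction m using Nat.strong_induction_on with
  | _ m ih =>
    intro p q hm hp hq hn h1 h2
    rcases lt_trichotomy p q with hlt | heq | hgt
    · rw [← Nat.gcd_sub_self_right (le_of_lt hlt)]
      exact ih q (by omega) p (q - p) (by omega) hp (by omega) (by omega) h1
        (pvPer_sub s p q hp hlt hn h1 h2)
    · subst heq; rw [Nat.gcd_self]; exact h1
    · rw [Nat.gcd_comm]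
      rw [← Nat.gcd_sub_self_right (le_of_lt hgt)]
      exact ih p (by omega) q (p - q) (by omega) hq (by omega) (by omega) h2
        (pvPer_sub s q p hq hgt (by omega) h2 h1)

-- B's loop returns the least period ≥ its start
lemma pvB_loop_spec (s : List String) :
    ∀ (k a q₀ : Nat), q₀ - a = k → 1 ≤ a → a ≤ q₀ → q₀ ≤ s.length → pvPer s q₀ →
      (∀ r, a ≤ r → r < q₀ → ¬ pvPer s r) →
      pvB_loop s (s.length : Int) (a : Int) = (q₀ : Int) := by
  intro k
  induction k with
  | zero =>
    intro a q₀ hk h1 h2 h3 hper hmin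
    have ha : a = q₀ := by omega
    subst ha
    rw [pvB_loop, dif_neg]
    rintro ⟨hlt, hchk⟩
    rw [(pvBridgeB s a).mpr hper] at hchk
    exact Bool.false_ne_true hchk
  | succ k ih =>
    intro a q₀ hk h1 h2 h3 hper hmin
    have ha : a < q₀ := by omega
    rw [pvB_loop, dif_pos]
    · have e : ((a : Int) + 1) = ((a + 1 : Nat) : Int) := by push_cast; ring
      rw [e]
      exact ih (a + 1) q₀ (by omega) (by omega) (by omega) h3 hper
        (fun r hr1 hr2 => hmin r (by omega) hr2)
    · refine ⟨by exact_mod_cast (by omega : a < s.length), ?_⟩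
      have hnot := hmin a le_rfl ha
      cases hb : pvB_check s (s.length : Int) (a : Int) with
      | false => exact absurd ((pvBridgeB s a).mp hb) hnot
      | true => rfl

-- A's loop returns the prefix cut at the least divisor-period ≥ its start
lemma pvA_loop_spec (s : List String) :
    ∀ (k a p₀ : Nat), p₀ - a = k → 1 ≤ a → a ≤ p₀ → p₀ ≤ s.length →
      (p₀ ∣ s.length ∧ pvPer s p₀) →
      (∀ r, a ≤ r → r < p₀ → ¬ (r ∣ s.length ∧ pvPer s r)) →
      pvA_loop s (s.length : Int) (PySem.List.pyRange (a : Int) ((s.length : Int) + 1) 1)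
        = s.take p₀ := by
  intro k
  induction k with
  | zero =>
    intro a p₀ hk h1 h2 h3 hhit hmin
    have ha : a = p₀ := by omega
    subst ha
    rw [PySem.List.pyRange_one_cons (by exact_mod_cast (by omega : (a : Int) < (s.length : Int) + 1))]
    simp only [pvA_loop]
    rw [PySem.Int.mod_natCast]
    rw [if_pos (by exact_mod_cast Nat.mod_eq_zero_of_dvd hhit.1)]
    rw [PySem.List.slice_to_natCast, PySem.Int.floordiv_natCast]
    simp only [PySem.List.pyRepeat, Int.toNat_natCast]
    rw [if_pos ((pvBridgeA s a h1 h3 hhit.1).mpr hhit.2)]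
  | succ k ih =>
    intro a p₀ hk h1 h2 h3 hhit hmin
    have ha : a < p₀ := by omega
    rw [PySem.List.pyRange_one_cons (by exact_mod_cast (by omega : (a : Int) < (s.length : Int) + 1))]
    simp only [pvA_loop]
    have erec : ((a : Int) + 1) = ((a + 1 : Nat) : Int) := by push_cast; ring
    have hrec := ih (a + 1) p₀ (by omega) (by omega) (by omega) h3 hhit
      (fun r hr1 hr2 => hmin r (by omega) hr2)
    rw [erec] at *
    by_cases hdv : a ∣ s.length
    · rw [PySem.Int.mod_natCast]
      rw [if_pos (by exact_mod_cast Nat.mod_eq_zero_of_dvd hdv)]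
      rw [PySem.List.slice_to_natCast, PySem.Int.floordiv_natCast]
      simp only [PySem.List.pyRepeat, Int.toNat_natCast]
      rw [if_neg (fun hc => (hmin a le_rfl ha)
        ⟨hdv, (pvBridgeA s a h1 (by omega) hdv).mp hc⟩)]
      exact hrec
    · rw [PySem.Int.mod_natCast]
      rw [if_neg (by
        intro hc
        exact hdv (Nat.dvd_iff_mod_eq_zero.mpr (by exact_mod_cast hc)))]
      exact hrec

-- ===== VERDICT (by name: the statement is the Claim_ definition above) =====
theorem find_repeating_block_spec : Claim_equal_find_repeating_block := by
  intro s _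
  simp only [Spec_find_repeating_block, find_repeating_block, find_repeating_block_alt]
  by_cases hN : s.length ≤ 1
  · rw [if_pos (by exact_mod_cast hN)]
    rw [pvB_loop, dif_neg (by rintro ⟨h, -⟩; exact absurd h (by omega))]
    rw [if_neg (by rintro ⟨h, -⟩; exact absurd h (by omega))]
  · rw [Nat.not_le] at hN
    rw [if_neg (by omega)]
    haveI hdecQ : DecidablePred (fun q => 0 < q ∧ pvPer s q) := fun _ => Classical.propDecidable _
    haveI hdecP : DecidablePred (fun p => p ∣ s.length ∧ pvPer s p) := fun _ => Classical.propDecidable _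
    have exQ : ∃ q, 0 < q ∧ pvPer s q := ⟨s.length, by omega, pvPer_length s⟩
    have exP : ∃ p, p ∣ s.length ∧ pvPer s p := ⟨s.length, dvd_refl _, pvPer_length s⟩
    set q₀ := Nat.find exQ with hq₀def
    have hq₀ : 0 < q₀ ∧ pvPer s q₀ := Nat.find_spec exQ
    have hq₀le : q₀ ≤ s.length := Nat.find_min' exQ ⟨by omega, pvPer_length s⟩
    have hq₀min : ∀ r, r < q₀ → ¬(0 < r ∧ pvPer s r) := fun r hr => Nat.find_min exQ hr
    set p₀ := Nat.find exP with hp₀def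
    have hp₀ : p₀ ∣ s.length ∧ pvPer s p₀ := Nat.find_spec exP
    have hp₀le : p₀ ≤ s.length := Nat.find_min' exP ⟨dvd_refl _, pvPer_length s⟩
    have hp₀min : ∀ r, r < p₀ → ¬(r ∣ s.length ∧ pvPer s r) := fun r hr => Nat.find_min exP hr
    have hp₀pos : 0 < p₀ := by
      rcases Nat.eq_zero_or_pos p₀ with h | h
      · exfalso
        have hz : p₀ ∣ s.length := hp₀.1
        rw [h] at hz
        have := Nat.eq_zero_of_zero_dvd hz
        omega
      · exact h
    have hA : pvA_loop s (s.length : Int) (PySem.List.pyRange 1 ((s.length : Int) + 1) 1)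
        = s.take p₀ := by
      have := pvA_loop_spec s (p₀ - 1) 1 p₀ rfl le_rfl hp₀pos hp₀le hp₀
        (fun r h1 h2 => hp₀min r h2)
      simpa using this
    have hB : pvB_loop s (s.length : Int) 1 = (q₀ : Int) := by
      have := pvB_loop_spec s (q₀ - 1) 1 q₀ rfl le_rfl hq₀.1 hq₀le hq₀.2
        (fun r h1 h2 hper => hq₀min r h2 ⟨by omega, hper⟩)
      simpa using this
    rw [hA, hB]
    by_cases hdvd : q₀ ∣ s.length
    · have hpq : p₀ = q₀ := le_antisymm (Nat.find_min' exP ⟨hdvd, hq₀.2⟩)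
        (Nat.find_min' exQ ⟨hp₀pos, hp₀.2⟩)
      by_cases hqN : q₀ < s.length
      · rw [if_pos ⟨by exact_mod_cast hqN,
          by rw [PySem.Int.mod_natCast]; exact_mod_cast Nat.mod_eq_zero_of_dvd hdvd⟩]
        rw [PySem.List.slice_to_natCast, hpq]
      · have hqe : q₀ = s.length := by omega
        rw [if_neg (by rintro ⟨h, -⟩; exact absurd h (by omega))]
        rw [hpq, hqe, List.take_length]
    · have hqN : q₀ < s.length := by
        rcases Nat.lt_or_ge q₀ s.length with h | h
        · exact h
        · exfalso
          have hqe : q₀ = s.length := by omega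
          rw [hqe] at hdvd
          exact hdvd (dvd_refl _)
      have hp₀N : p₀ = s.length := by
        by_contra hne
        have hlt : p₀ < s.length := by omega
        have hq₀lt : q₀ < p₀ := by
          rcases Nat.lt_or_ge q₀ p₀ with h | h
          · exact h
          · exfalso
            have hle : q₀ ≤ p₀ := Nat.find_min' exQ ⟨hp₀pos, hp₀.2⟩
            have hqe : q₀ = p₀ := by omega
            rw [hqe] at hdvd
            exact hdvd hp₀.1
        obtain ⟨c, hc⟩ := hp₀.1
        have hc2 : 2 ≤ c := by
          rcases Nat.lt_or_ge c 2 with h | h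
          · interval_cases c <;> omega
          · exact h
        have h2p : 2 * p₀ ≤ s.length := by
          rw [hc]
          calc 2 * p₀ = p₀ * 2 := by ring
            _ ≤ p₀ * c := Nat.mul_le_mul_left _ hc2
        have hsum : q₀ + p₀ ≤ s.length := by omega
        have hg := pvPer_gcd s (q₀ + p₀) q₀ p₀ le_rfl hq₀.1 hp₀pos hsum hq₀.2 hp₀.2
        have hgpos : 0 < Nat.gcd q₀ p₀ := Nat.gcd_pos_of_pos_left _ hq₀.1
        have hgle : Nat.gcd q₀ p₀ ≤ q₀ := Nat.gcd_le_left _ hq₀.1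
        have hgeq : Nat.gcd q₀ p₀ = q₀ := by
          have hq₀g : q₀ ≤ Nat.gcd q₀ p₀ := Nat.find_min' exQ ⟨hgpos, hg⟩
          omega
        have hdq : q₀ ∣ p₀ := hgeq ▸ Nat.gcd_dvd_right q₀ p₀
        exact hdvd (hdq.trans ⟨c, hc⟩)
      rw [if_neg (by
        rintro ⟨h1, h2⟩
        rw [PySem.Int.mod_natCast] at h2
        exact hdvd (Nat.dvd_iff_mod_eq_zero.mpr (by exact_mod_cast h2)))]
      rw [hp₀N, List.take_length]
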